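-- pv_equiv track=rewrite | github.com/maxmaxou2/poker_project | common/combinations_utils.py | doublePairValue
-- ===== SOURCE A (Python) =====
-- def doublePairValue(r_counts, s_counts) :
--     two_1, two_2 = 0, 0
--     first, second = True, True
--     i = len(r_counts)-1
--     while i > -1 and (first or second):
--         if r_counts[i] == 2 and first :
--             two_1 = i
--             first = False
--         elif r_counts[i] == 2 and second :
--             two_2 = i
--             second = False
--         i -= 1
--     return [two_1, two_2]
-- ===== SOURCE B (Python) =====
-- def doublePairValue(r_counts, s_counts):
--     pairs = [i for i, c in enumerate(r_counts) if c == 2]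
--     two_1 = pairs[-1] if pairs else 0
--     two_2 = pairs[-2] if len(pairs) >= 2 else 0
--     return [two_1, two_2]
-- ===== Notes on version B (the rewrite author's own statement) =====
-- stated objective: simpler
-- what changed: Collect all pair ranks in one ascending comprehension, then pick the last two, instead of a descending while-loop with two boolean flags and early exit.
import Mathlib
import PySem

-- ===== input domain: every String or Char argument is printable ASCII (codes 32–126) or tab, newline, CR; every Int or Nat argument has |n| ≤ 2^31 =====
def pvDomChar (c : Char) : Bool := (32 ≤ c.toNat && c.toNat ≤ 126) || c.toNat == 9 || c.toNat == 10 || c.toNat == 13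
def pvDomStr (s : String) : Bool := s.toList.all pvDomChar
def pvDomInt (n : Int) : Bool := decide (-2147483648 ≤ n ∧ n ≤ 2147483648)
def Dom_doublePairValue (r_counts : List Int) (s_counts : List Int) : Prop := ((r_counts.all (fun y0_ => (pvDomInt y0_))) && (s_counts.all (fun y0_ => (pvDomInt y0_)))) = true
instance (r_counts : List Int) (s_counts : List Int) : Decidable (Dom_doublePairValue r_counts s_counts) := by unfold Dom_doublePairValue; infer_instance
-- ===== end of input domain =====

-- B collects all pair ranks in one ascending pass and then picks the last two,
-- replacing A's descending while-loop with two boolean flags and early exit (objective: simpler).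

-- ===== PORT A =====
-- the while loop, indexed by i+1 (fuel n means current index i = n-1); r_counts[i] is
-- always in range here (i runs from len-1 down to 0), so List.getD is exact for it
def dpvLoop (r : List Int) : Nat → Int → Int → Bool → Bool → List Int
  | 0, t1, t2, _, _ => [t1, t2]
  | n+1, t1, t2, first, second =>
    if first || second then
      if r.getD n 0 = 2 ∧ first = true then dpvLoop r n (n : Int) t2 false second
      else if r.getD n 0 = 2 ∧ second = true then dpvLoop r n t1 (n : Int) first false
      else dpvLoop r n t1 t2 first second
    else [t1, t2]

def doublePairValue (r_counts : List Int) (s_counts : List Int) : List Int :=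
  dpvLoop r_counts r_counts.length 0 0 true true

-- ===== PORT B =====
def doublePairValue_alt (r_counts : List Int) (s_counts : List Int) : List Int :=
  let pairs := ((PySem.List.enumerate r_counts).filter (fun p => p.2 == 2)).map (fun p => p.1)
  let two_1 := if !pairs.isEmpty then (PySem.List.pyGet? pairs (-1)).getD 0 else 0
  let two_2 := if 2 ≤ pairs.length then (PySem.List.pyGet? pairs (-2)).getD 0 else 0
  [two_1, two_2]

-- ===== PRECONDITION & SPEC =====
def Spec_doublePairValue (r_counts : List Int) (s_counts : List Int) (out : List Int) : Prop := out = doublePairValue_alt r_counts s_counts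
instance (r_counts : List Int) (s_counts : List Int) (out : List Int) : Decidable (Spec_doublePairValue r_counts s_counts out) := by unfold Spec_doublePairValue; infer_instance

-- ===== CLAIM (what is proved, stated in full; the proofs are below) =====
def Claim_equal_doublePairValue : Prop := ∀ (r_counts : List Int) (s_counts : List Int), Dom_doublePairValue r_counts s_counts → Spec_doublePairValue r_counts s_counts (doublePairValue r_counts s_counts)

-- ===== LEMMAS AND PROOFS =====

-- ascending list of the indices j < n with r[j] = 2 (the "pairs" of both programs)
def dpvPairs (r : List Int) : Nat → List Int
  | 0 => []
  | n+1 => dpvPairs r n ++ (if r.getD n 0 = 2 then [(n : Int)] else [])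

theorem dpvLoop_ff (r : List Int) (n : Nat) (t1 t2 : Int) :
    dpvLoop r n t1 t2 false false = [t1, t2] := by
  cases n <;> simp [dpvLoop]

theorem dpvLoop_ft (r : List Int) (n : Nat) (t1 t2 : Int) :
    dpvLoop r n t1 t2 false true = [t1, ((dpvPairs r n).getLast?).getD t2] := by
  induction n generalizing t2 with
  | zero => simp [dpvLoop, dpvPairs]
  | succ m ih =>
    by_cases h : r[m]?.getD 0 = 2
    · simp [dpvLoop, dpvPairs, List.getD, h, dpvLoop_ff]
    · simp [dpvLoop, dpvPairs, List.getD, h, ih]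

theorem dpvLoop_tt (r : List Int) (n : Nat) :
    dpvLoop r n 0 0 true true =
      [((dpvPairs r n).getLast?).getD 0, ((dpvPairs r n).dropLast.getLast?).getD 0] := by
  induction n with
  | zero => simp [dpvLoop, dpvPairs]
  | succ m ih =>
    by_cases h : r[m]?.getD 0 = 2
    · simp [dpvLoop, dpvPairs, List.getD, h, dpvLoop_ft]
    · simp [dpvLoop, dpvPairs, List.getD, h, ih]

-- B's "pairs" list equals dpvPairs over the whole length
theorem dpvPairs_append_le (xs ys : List Int) (n : Nat) (h : n ≤ xs.length) :
    dpvPairs (xs ++ ys) n = dpvPairs xs n := by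
  induction n with
  | zero => rfl
  | succ m ih =>
    have hm : m < xs.length := by omega
    simp [dpvPairs, ih (by omega), List.getD, List.getElem?_append_left hm]

theorem dpvPairs_eq (r : List Int) :
    ((PySem.List.enumerate r).filter (fun p => p.2 == 2)).map (fun p => p.1)
      = dpvPairs r r.length := by
  induction r using List.reverseRecOn with
  | nil => rfl
  | append_singleton xs x ih =>
    rw [PySem.List.enumerate_append]
    simp only [List.filter_append, List.map_append, ih]
    have h1 : dpvPairs (xs ++ [x]) (xs.length + 1)
        = dpvPairs (xs ++ [x]) xs.length ++ (if (xs ++ [x]).getD xs.length 0 = 2 then [(xs.length : Int)] else []) := rfl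
    have h2 : (xs ++ [x]).getD xs.length 0 = x := by
      simp [List.getD]
    simp only [List.length_append, List.length_singleton, h1, h2,
      dpvPairs_append_le xs [x] xs.length le_rfl]
    by_cases hx : x = 2
    · simp [PySem.List.enumerate, hx]
    · simp [PySem.List.enumerate, hx]

-- ===== VERDICT (by name: the statement is the Claim_ definition above) =====
theorem doublePairValue_spec : Claim_equal_doublePairValue := by
  intro r s _
  unfold Spec_doublePairValue doublePairValue doublePairValue_alt
  rw [dpvLoop_tt, dpvPairs_eq]
  set P := dpvPairs r r.length with hP
  congr 1
  · -- first component
    cases hQ : P with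
    | nil => simp
    | cons a Q => simp [PySem.List.pyGet?_neg_one]
  · -- second component
    by_cases h2 : 2 ≤ P.length
    · rw [if_pos h2, PySem.List.pyGet?_neg_ofNat P 2 (by omega) h2]
      have hd : P.dropLast.getLast? = P[P.length - 2]? := by
        rw [List.getLast?_eq_getElem?, List.getElem?_dropLast, List.length_dropLast,
          if_pos (by omega)]
        congr 1
      simp [hd]
    · rw [if_neg h2]
      have : P.dropLast = [] :=
        List.eq_nil_of_length_eq_zero (by rw [List.length_dropLast]; omega)
      simp [this]
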